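-- pv_equiv track=rewrite | github.com/jimmy-print/lang | ll.py | is_comment
-- ===== SOURCE A (Python) =====
-- COMMENT_PREFIX = '#'
--
-- def is_comment(s):
--     found_hash = False
--     for c in s:
--         if not found_hash and c != COMMENT_PREFIX and c != ' ':
--             return False
--         if c == COMMENT_PREFIX:
--             found_hash = True
--     return True
-- ===== SOURCE B (Python) =====
-- COMMENT_PREFIX = '#'
--
-- def is_comment(s):
--     stripped = s.lstrip(' ')
--     return stripped == '' or stripped[0] == COMMENT_PREFIX
-- ===== Notes on version B (the rewrite author's own statement) =====
-- stated objective: simpler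
-- what changed: Replaced the character loop with its found_hash flag by one leading-space strip followed by a single check of the first surviving character.
import Mathlib
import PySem

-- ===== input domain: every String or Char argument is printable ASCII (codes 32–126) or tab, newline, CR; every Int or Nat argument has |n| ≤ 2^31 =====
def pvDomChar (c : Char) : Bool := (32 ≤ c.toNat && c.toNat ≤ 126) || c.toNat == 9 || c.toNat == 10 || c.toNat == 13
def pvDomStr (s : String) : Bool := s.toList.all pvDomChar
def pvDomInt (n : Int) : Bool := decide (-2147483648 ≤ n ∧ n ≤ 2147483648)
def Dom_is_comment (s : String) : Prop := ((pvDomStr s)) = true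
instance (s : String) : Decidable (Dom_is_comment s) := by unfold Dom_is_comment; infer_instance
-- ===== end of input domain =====

-- B replaces A's character loop with one lstrip(' ') boundary computation and a single first-character check (simpler).

-- ===== PORT A =====
-- the for-loop over s with the found_hash flag, transcribed as structural recursion
def is_comment_loop (found_hash : Bool) (cs : List Char) : Bool :=
  match cs with
  | [] => true
  | c :: rest =>
      if !found_hash && c != '#' && c != ' ' then false
      else is_comment_loop (found_hash || c == '#') rest

def is_comment (s : String) : Bool :=
  is_comment_loop false s.toList

-- ===== PORT B =====
def is_comment_alt (s : String) : Bool :=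
  let stripped := s.toList.dropWhile (· == ' ')   -- s.lstrip(' ')
  stripped.isEmpty || stripped.head? == some '#'

-- ===== PRECONDITION & SPEC =====
def Spec_is_comment (s : String) (out : Bool) : Prop := out = is_comment_alt s
instance (s : String) (out : Bool) : Decidable (Spec_is_comment s out) := by unfold Spec_is_comment; infer_instance

-- ===== CLAIM (what is proved, stated in full; the proofs are below) =====
def Claim_equal_is_comment : Prop := ∀ (s : String), Dom_is_comment s → Spec_is_comment s (is_comment s)

-- ===== LEMMAS AND PROOFS =====
theorem is_comment_loop_true (cs : List Char) : is_comment_loop true cs = true := by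
  induction cs with
  | nil => rfl
  | cons c rest ih => simp [is_comment_loop, ih]

theorem is_comment_loop_false (cs : List Char) :
    is_comment_loop false cs =
      ((cs.dropWhile (· == ' ')).isEmpty || (cs.dropWhile (· == ' ')).head? == some '#') := by
  induction cs with
  | nil => rfl
  | cons c rest ih =>
    by_cases hsp : c = ' '
    · subst hsp
      simpa [is_comment_loop, List.dropWhile] using ih
    · by_cases hh : c = '#'
      · subst hh
        simp [is_comment_loop, List.dropWhile, is_comment_loop_true]
      · simp [is_comment_loop, List.dropWhile_cons, hsp, hh]

-- ===== VERDICT (by name: the statement is the Claim_ definition above) =====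
theorem is_comment_spec : Claim_equal_is_comment := by
  intro s _
  unfold Spec_is_comment is_comment is_comment_alt
  exact is_comment_loop_false s.toList
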